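-- pv_equiv track=rewrite | github.com/Nazmon2002/Learning-Python | dfs_2.py | find_path_with_target_sum
-- ===== SOURCE A (Python) =====
-- def find_path_with_target_sum(grid, target):
--     rows, cols = len(grid), len(grid[0])
--     visited = [[False]*cols for _ in range(rows)]
--     path = []
--
--     def dfs(r, c, current_sum):
--         if r < 0 or r >= rows or c < 0 or c >= cols or visited[r][c]:
--             return False
--
--         current_sum += grid[r][c]
--         path.append((r, c))
--         visited[r][c] = True
--
--         if current_sum == target:
--             return True
--
--         # right, down, left, up
--         for dr, dc in [(0,1), (1,0), (0,-1), (-1,0)]: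
--             if dfs(r + dr, c + dc, current_sum):
--                 return True
--
--         visited[r][c] = False
--         path.pop()
--         return False
--
--     for i in range(rows):
--         for j in range(cols):
--             if dfs(i, j, 0):
--                 return True, path
--
--     return False, []
-- ===== SOURCE B (Python) =====
-- def find_path_with_target_sum(grid, target):
--     rows, cols = len(grid), len(grid[0])
--     visited = [[False] * cols for _ in range(rows)]
--     path = []
--     dirs = [(0, 1), (1, 0), (0, -1), (-1, 0)]
--     for i in range(rows):
--         for j in range(cols):
--             s0 = grid[i][j]
--             visited[i][j] = True
--             path.append((i, j))
--             if s0 == target: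
--                 return True, path
--             stack = [(i, j, s0, dirs)]
--             while stack:
--                 r, c, s, ds = stack[-1]
--                 if not ds:
--                     visited[r][c] = False
--                     path.pop()
--                     stack.pop()
--                     continue
--                 stack[-1] = (r, c, s, ds[1:])
--                 dr, dc = ds[0]
--                 nr, nc = r + dr, c + dc
--                 if 0 <= nr < rows and 0 <= nc < cols and not visited[nr][nc]:
--                     ns = s + grid[nr][nc]
--                     visited[nr][nc] = True
--                     path.append((nr, nc))
--                     if ns == target:
--                         return True, path
--                     stack.append((nr, nc, ns, dirs))
--     return False, []
-- ===== Notes on version B (the rewrite author's own statement) =====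
-- stated objective: alternative
-- what changed: The recursive backtracking DFS (nested def mutating shared visited/path through the call stack) is replaced by an explicit iterative DFS over a stack of (r, c, sum, remaining-directions) frames with the same right/down/left/up exploration order, so the call stack disappears.
-- outside the precondition, e.g. on find_path_with_target_sum([[0, 1], [3]], 0): A returns (True, [(0, 0)]), B returns (True, [(0, 0)])
import Mathlib
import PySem

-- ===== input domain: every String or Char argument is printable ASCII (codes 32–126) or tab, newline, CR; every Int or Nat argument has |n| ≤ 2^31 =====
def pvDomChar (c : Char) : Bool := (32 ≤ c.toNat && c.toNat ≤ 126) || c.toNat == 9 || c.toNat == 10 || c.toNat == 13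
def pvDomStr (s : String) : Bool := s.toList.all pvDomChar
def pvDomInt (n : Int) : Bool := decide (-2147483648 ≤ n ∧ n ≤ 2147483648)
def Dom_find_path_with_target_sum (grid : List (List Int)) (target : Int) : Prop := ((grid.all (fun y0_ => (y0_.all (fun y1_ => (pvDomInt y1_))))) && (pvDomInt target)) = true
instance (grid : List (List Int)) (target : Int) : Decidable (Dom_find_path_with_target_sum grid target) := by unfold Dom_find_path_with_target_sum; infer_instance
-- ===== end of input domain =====

-- B replaces A's recursive backtracking DFS by an explicit iterative DFS over a stack of
-- (r, c, sum, remaining-directions) frames, same exploration order (alternative decomposition,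
-- not claimed faster). Return values only (the Python versions mutate local lists).

-- ===== PORT A =====
-- shared small helpers: 2D visited read/update, grid cell read, the direction list
def pvGet2 (v : List (List Bool)) (r c : Nat) : Bool := (v.getD r []).getD c false
def pvSet2 (v : List (List Bool)) (r c : Nat) (b : Bool) : List (List Bool) :=
  v.set r ((v.getD r []).set c b)
def pvCell (g : List (List Int)) (r c : Int) : Int := (g.getD r.toNat []).getD c.toNat 0
def pvDirs : List (Int × Int) := [(0,1), (1,0), (0,-1), (-1,0)]
def pvRows (g : List (List Int)) : Int := (g.length : Int)
def pvCols (g : List (List Int)) : Int := ((g.headD []).length : Int)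
-- the row-major start cells of the two nested `for` loops
def pvStarts (g : List (List Int)) : List (Int × Int) :=
  (List.range g.length).flatMap
    (fun (i : Nat) => (List.range (g.headD []).length).map (fun (j : Nat) => ((i : Int), (j : Int))))

-- Python A's `dfs`, with the shared mutable (visited, path) threaded as state; the fuel
-- (recursion depth bound rows*cols+1, passed at each call site) is never exhausted.
def dfsA (g : List (List Int)) (t : Int) : Nat → Int → Int → Int →
    (List (List Bool) × List (Int × Int)) → ((List (List Bool) × List (Int × Int)) × Bool)
  | 0, _, _, _, st => (st, false)
  | f+1, r, c, s, (vis, path) =>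
    if r < 0 ∨ pvRows g ≤ r ∨ c < 0 ∨ pvCols g ≤ c ∨ pvGet2 vis r.toNat c.toNat = true then
      ((vis, path), false)
    else
      let s' := s + pvCell g r c
      let path' := path ++ [(r, c)]
      let vis' := pvSet2 vis r.toNat c.toNat true
      if s' = t then ((vis', path'), true)
      else
        let res := pvDirs.foldl
          (fun acc d => if acc.2 then acc else dfsA g t f (r + d.1) (c + d.2) s' acc.1)
          ((vis', path'), false)
        if res.2 then res
        else ((pvSet2 res.1.1 r.toNat c.toNat false, res.1.2.dropLast), false)

-- the two nested start loops with their early return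
def startsA (g : List (List Int)) (t : Int) :
    List (Int × Int) → List (List Bool) → List (Int × Int) → Bool × List (Int × Int)
  | [], _, _ => (false, [])
  | (i, j) :: rest, vis, path =>
    match dfsA g t (g.length * (g.headD []).length + 1) i j 0 (vis, path) with
    | (st, true) => (true, st.2)
    | (st, false) => startsA g t rest st.1 st.2

def find_path_with_target_sum (grid : List (List Int)) (target : Int) : Bool × (List (Int × Int)) :=
  startsA grid target (pvStarts grid)
    (List.replicate grid.length (List.replicate (grid.headD []).length false)) []

-- ===== PORT B =====
-- B's while loop over the explicit stack of (r, c, sum, remaining-directions) frames;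
-- the fuel bounds the number of loop iterations and is never exhausted.
def loopB (g : List (List Int)) (t : Int) : Nat → List (Int × Int × Int × List (Int × Int)) →
    List (List Bool) → List (Int × Int) →
    List (List Bool) × List (Int × Int) × Option (List (Int × Int))
  | 0, _, vis, path => (vis, path, none)
  | _+1, [], vis, path => (vis, path, none)
  | f+1, (r, c, s, ds) :: rest, vis, path =>
    match ds with
    | [] => loopB g t f rest (pvSet2 vis r.toNat c.toNat false) path.dropLast
    | (dr, dc) :: ds' =>
      let nr := r + dr
      let nc := c + dc
      if 0 ≤ nr ∧ nr < pvRows g ∧ 0 ≤ nc ∧ nc < pvCols g ∧ pvGet2 vis nr.toNat nc.toNat = false then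
        let ns := s + pvCell g nr nc
        let vis' := pvSet2 vis nr.toNat nc.toNat true
        let path' := path ++ [(nr, nc)]
        if ns = t then (vis', path', some path')
        else loopB g t f ((nr, nc, ns, pvDirs) :: (r, c, s, ds') :: rest) vis' path'
      else loopB g t f ((r, c, s, ds') :: rest) vis path

def startsB (g : List (List Int)) (t : Int) :
    List (Int × Int) → List (List Bool) → List (Int × Int) → Bool × List (Int × Int)
  | [], _, _ => (false, [])
  | (i, j) :: rest, vis, path =>
    let s0 := pvCell g i j
    let vis0 := pvSet2 vis i.toNat j.toNat true
    let path0 := path ++ [(i, j)]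
    if s0 = t then (true, path0)
    else
      match loopB g t (10 ^ (g.length * (g.headD []).length + 1)) [(i, j, s0, pvDirs)] vis0 path0 with
      | (_, _, some p) => (true, p)
      | (vis1, path1, none) => startsB g t rest vis1 path1

def find_path_with_target_sum_alt (grid : List (List Int)) (target : Int) : Bool × (List (Int × Int)) :=
  startsB grid target (pvStarts grid)
    (List.replicate grid.length (List.replicate (grid.headD []).length false)) []

-- ===== PRECONDITION & SPEC =====
-- Pre_ excludes empty grids and ragged grids having a row shorter than the first row:
-- there Python A raises IndexError (except when the target is found before any short row
-- is touched, where A and B return the same value anyway).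
def Pre_find_path_with_target_sum (grid : List (List Int)) (target : Int) : Prop :=
  grid ≠ [] ∧ ∀ row ∈ grid, (grid.headD []).length ≤ row.length
instance (grid : List (List Int)) (target : Int) : Decidable (Pre_find_path_with_target_sum grid target) := by
  unfold Pre_find_path_with_target_sum; infer_instance
def pvWitness_find_path_with_target_sum : List (List Int) × Int := ([[1, 2], [3, 4]], 3)

def Spec_find_path_with_target_sum (grid : List (List Int)) (target : Int) (out : Bool × (List (Int × Int))) : Prop := out = find_path_with_target_sum_alt grid target
instance (grid : List (List Int)) (target : Int) (out : Bool × (List (Int × Int))) : Decidable (Spec_find_path_with_target_sum grid target out) := by unfold Spec_find_path_with_target_sum; infer_instance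

-- ===== CLAIM (what is proved, stated in full; the proofs are below) =====
def Claim_equal_find_path_with_target_sum : Prop := ∀ (grid : List (List Int)) (target : Int), Dom_find_path_with_target_sum grid target → Pre_find_path_with_target_sum grid target → Spec_find_path_with_target_sum grid target (find_path_with_target_sum grid target)

-- ===== LEMMAS AND PROOFS =====

-- ---- generic list helpers ----
theorem pv_getD_set {α : Type} (d : α) : ∀ (l : List α) (n : Nat) (x : α), n < l.length → (l.set n x).getD n d = x := by
  intro l
  induction l with
  | nil => intro n x h; simp at h
  | cons a as ih =>
    intro n x h
    cases n with
    | zero => rfl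
    | succ m => simpa using ih m x (by simpa using h)

theorem pv_set_getD {α : Type} (d : α) : ∀ (l : List α) (n : Nat), n < l.length → l.set n (l.getD n d) = l := by
  intro l
  induction l with
  | nil => intro n h; simp at h
  | cons a as ih =>
    intro n h
    cases n with
    | zero => rfl
    | succ m => simpa using ih m (by simpa using h)

theorem pv_row_set_unset : ∀ (l : List Bool) (c : Nat), l.getD c false = false → (l.set c true).set c false = l := by
  intro l
  induction l with
  | nil => intro c _; rfl
  | cons a as ih =>
    intro c h
    cases c with
    | zero => simp_all
    | succ m => simpa using ih m (by simpa using h)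

theorem pv_set_unset (v : List (List Bool)) (r c : Nat) (h : pvGet2 v r c = false) :
    pvSet2 (pvSet2 v r c true) r c false = v := by
  by_cases hr : r < v.length
  · unfold pvSet2
    rw [pv_getD_set [] v r _ hr, List.set_set, pv_row_set_unset _ _ h]
    exact pv_set_getD [] v r hr
  · have h1 : pvSet2 v r c true = v := List.set_eq_of_length_le (by omega)
    have h2 : pvSet2 v r c false = v := List.set_eq_of_length_le (by omega)
    rw [h1, h2]

-- ---- dimensions and unvisited count ----
def DimOk (g : List (List Int)) (v : List (List Bool)) : Prop :=
  v.length = g.length ∧ ∀ row ∈ v, row.length = (g.headD []).length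

theorem pv_dim_row (g : List (List Int)) (v : List (List Bool)) (h : DimOk g v) (i : Nat)
    (hi : i < v.length) : (v.getD i []).length = (g.headD []).length := by
  have : v.getD i [] ∈ v := by
    rw [List.getD_eq_getElem v [] hi]; exact List.getElem_mem hi
  exact h.2 _ this

theorem pv_dim_set (g : List (List Int)) (v : List (List Bool)) (r c : Nat) (b : Bool)
    (h : DimOk g v) : DimOk g (pvSet2 v r c b) := by
  by_cases hr : r < v.length
  · refine ⟨by simpa [pvSet2] using h.1, ?_⟩
    intro row hrow
    rcases List.mem_or_eq_of_mem_set hrow with hm | he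
    · exact h.2 _ hm
    · subst he
      simpa using pv_dim_row g v h r hr
  · have : pvSet2 v r c b = v := List.set_eq_of_length_le (by omega)
    rw [this]; exact h

def cntF (v : List (List Bool)) : Nat := (v.map (fun row => row.count false)).sum

theorem pv_row_count_set : ∀ (l : List Bool) (c : Nat), c < l.length → l.getD c false = false →
    (l.set c true).count false + 1 = l.count false := by
  intro l
  induction l with
  | nil => intro c h; simp at h
  | cons a as ih =>
    intro c h hg
    cases c with
    | zero =>
      simp only [List.getD_cons_zero] at hg; subst hg
      simp [List.count_cons]
    | succ m =>
      have := ih m (by simpa using h) (by simpa using hg)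
      simp only [List.set_cons_succ, List.count_cons]
      simp only [List.count_cons] at *
      omega

theorem pv_cnt_set (v : List (List Bool)) : ∀ (r : Nat) (c : Nat), r < v.length →
    c < (v.getD r []).length → pvGet2 v r c = false →
    cntF (pvSet2 v r c true) + 1 = cntF v := by
  induction v with
  | nil => intro r c h; simp at h
  | cons a as ih =>
    intro r c hr hc hg
    cases r with
    | zero =>
      simp only [pvSet2, List.getD_cons_zero, List.set_cons_zero, cntF, List.map_cons,
        List.sum_cons]
      have := pv_row_count_set a c (by simpa using hc) (by simpa [pvGet2] using hg)
      omega
    | succ m =>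
      have := ih m c (by simpa using hr) (by simpa using hc) (by simpa [pvGet2] using hg)
      simp only [pvSet2, List.getD_cons_succ, List.set_cons_succ, cntF, List.map_cons,
        List.sum_cons] at this ⊢
      omega

-- ---- A's guard as a named (reducible) condition ----
abbrev Gd (g : List (List Int)) (vis : List (List Bool)) (r c : Int) : Prop :=
  r < 0 ∨ pvRows g ≤ r ∨ c < 0 ∨ pvCols g ≤ c ∨ pvGet2 vis r.toNat c.toNat = true

theorem pv_guard_iff (g : List (List Int)) (vis : List (List Bool)) (r c : Int) :
    (0 ≤ r ∧ r < pvRows g ∧ 0 ≤ c ∧ c < pvCols g ∧ pvGet2 vis r.toNat c.toNat = false)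
      ↔ ¬ Gd g vis r c := by
  simp only [Gd, not_or, not_lt, not_le, Bool.not_eq_true]

-- ---- the A-side direction fold, resumable from any direction suffix ----
def tryA (g : List (List Int)) (t : Int) (f : Nat) (r c s : Int) (ds : List (Int × Int))
    (st : List (List Bool) × List (Int × Int)) :
    (List (List Bool) × List (Int × Int)) × Bool :=
  ds.foldl (fun acc d => if acc.2 then acc else dfsA g t f (r + d.1) (c + d.2) s acc.1) (st, false)

theorem pv_fold_true (g : List (List Int)) (t : Int) (f : Nat) (r c s : Int) :
    ∀ (ds : List (Int × Int)) (st : List (List Bool) × List (Int × Int)),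
      ds.foldl (fun acc d => if acc.2 then acc else dfsA g t f (r + d.1) (c + d.2) s acc.1)
        (st, true) = (st, true) := by
  intro ds
  induction ds with
  | nil => intro st; rfl
  | cons d ds ih => intro st; simpa using ih st

theorem tryA_nil (g : List (List Int)) (t : Int) (f : Nat) (r c s : Int)
    (st : List (List Bool) × List (Int × Int)) : tryA g t f r c s [] st = (st, false) := rfl

theorem tryA_cons (g : List (List Int)) (t : Int) (f : Nat) (r c s dr dc : Int)
    (ds : List (Int × Int)) (st : List (List Bool) × List (Int × Int)) :
    tryA g t f r c s ((dr, dc) :: ds) st =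
      (match dfsA g t f (r + dr) (c + dc) s st with
       | (st1, true) => (st1, true)
       | (st1, false) => tryA g t f r c s ds st1) := by
  unfold tryA
  simp only [List.foldl_cons, Bool.false_eq_true, if_false]
  rcases h : dfsA g t f (r + dr) (c + dc) s st with ⟨st1, b⟩
  cases b
  · rfl
  · exact pv_fold_true g t f r c s ds st1

theorem dfsA_zero (g : List (List Int)) (t : Int) (r c s : Int)
    (st : List (List Bool) × List (Int × Int)) : dfsA g t 0 r c s st = (st, false) := rfl

theorem dfsA_succ (g : List (List Int)) (t : Int) (f : Nat) (r c s : Int)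
    (vis : List (List Bool)) (path : List (Int × Int)) :
    dfsA g t (f + 1) r c s (vis, path) =
      if Gd g vis r c then ((vis, path), false)
      else
        let s' := s + pvCell g r c
        let path' := path ++ [(r, c)]
        let vis' := pvSet2 vis r.toNat c.toNat true
        if s' = t then ((vis', path'), true)
        else
          let res := tryA g t f r c s' pvDirs (vis', path')
          if res.2 then res
          else ((pvSet2 res.1.1 r.toNat c.toNat false, res.1.2.dropLast), false) := rfl

-- ---- state restoration: a failed dfs leaves (visited, path) exactly as it found them ----
theorem pv_restore (g : List (List Int)) (t : Int) : ∀ f : Nat,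
    (∀ r c s vis path st1, dfsA g t f r c s (vis, path) = (st1, false) → st1 = (vis, path)) ∧
    (∀ (ds : List (Int × Int)) r c s vis path st1,
      tryA g t f r c s ds (vis, path) = (st1, false) → st1 = (vis, path)) := by
  intro f
  induction f with
  | zero =>
    constructor
    · intro r c s vis path st1 h
      rw [dfsA_zero] at h
      injection h with h1 _
      exact h1.symm
    · intro ds
      induction ds with
      | nil =>
        intro r c s vis path st1 h; rw [tryA_nil] at h
        injection h with h1 _; exact h1.symm
      | cons d ds ih =>
        intro r c s vis path st1 h
        rcases d with ⟨dr, dc⟩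
        rw [tryA_cons, dfsA_zero] at h
        exact ih r c s vis path st1 h
  | succ f ihf =>
    have hdfs : ∀ r c s vis path st1,
        dfsA g t (f + 1) r c s (vis, path) = (st1, false) → st1 = (vis, path) := by
      intro r c s vis path st1 h
      rw [dfsA_succ] at h
      by_cases hg : Gd g vis r c
      · rw [if_pos hg] at h
        injection h with h1 _; exact h1.symm
      · rw [if_neg hg] at h
        simp only at h
        by_cases ht : s + pvCell g r c = t
        · rw [if_pos ht] at h; injection h with _ hb; cases hb
        · rw [if_neg ht] at h
          rcases htry : tryA g t f r c (s + pvCell g r c) pvDirs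
              (pvSet2 vis r.toNat c.toNat true, path ++ [(r, c)]) with ⟨st2, b⟩
          rw [htry] at h
          cases b
          · simp only [Bool.false_eq_true, if_false] at h
            have hst2 : st2 = (pvSet2 vis r.toNat c.toNat true, path ++ [(r, c)]) :=
              ihf.2 pvDirs r c (s + pvCell g r c) _ _ st2 htry
            rw [hst2] at h
            have hget : pvGet2 vis r.toNat c.toNat = false :=
              ((pv_guard_iff g vis r c).mpr hg).2.2.2.2
            injection h with h1 _
            rw [← h1]
            simp [pv_set_unset vis r.toNat c.toNat hget]
          · simp only [if_true] at h; injection h with _ hb; cases hb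
    refine ⟨hdfs, ?_⟩
    intro ds
    induction ds with
    | nil =>
      intro r c s vis path st1 h; rw [tryA_nil] at h
      injection h with h1 _; exact h1.symm
    | cons d ds ih =>
      intro r c s vis path st1 h
      rcases d with ⟨dr, dc⟩
      rw [tryA_cons] at h
      rcases hd : dfsA g t (f + 1) (r + dr) (c + dc) s (vis, path) with ⟨st2, b⟩
      rw [hd] at h
      cases b
      · simp only at h
        have : st2 = (vis, path) := hdfs _ _ _ _ _ _ hd
        rw [this] at h
        exact ih r c s vis path st1 h
      · simp only at h; injection h with _ hb; cases hb

-- ---- exact iteration count of B's loop while it works off one frame ----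
def costT (g : List (List Int)) (t : Int) : Nat → Int → Int → Int → List (Int × Int) →
    List (List Bool) → List (Int × Int) → Nat
  | _, _, _, _, [], _, _ => 1
  | f, r, c, s, (dr, dc) :: ds, vis, path =>
    let nr := r + dr
    let nc := c + dc
    let cd : Nat :=
      match f with
      | 0 => 0
      | f' + 1 =>
        if Gd g vis nr nc then 0
        else if s + pvCell g nr nc = t then 0
        else costT g t f' nr nc (s + pvCell g nr nc) pvDirs
          (pvSet2 vis nr.toNat nc.toNat true) (path ++ [(nr, nc)])
    match dfsA g t f nr nc s (vis, path) with
    | (_, true) => 1 + cd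
    | (st1, false) => 1 + cd + costT g t f r c s ds st1.1 st1.2
  termination_by f _ _ _ ds => (f, ds.length)

def costD (g : List (List Int)) (t : Int) (f : Nat) (r c s : Int) (vis : List (List Bool))
    (path : List (Int × Int)) : Nat :=
  match f with
  | 0 => 0
  | f' + 1 =>
    if Gd g vis r c then 0
    else if s + pvCell g r c = t then 0
    else costT g t f' r c (s + pvCell g r c) pvDirs
      (pvSet2 vis r.toNat c.toNat true) (path ++ [(r, c)])

theorem costD_succ (g : List (List Int)) (t : Int) (f' : Nat) (r c s : Int)
    (vis : List (List Bool)) (path : List (Int × Int)) :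
    costD g t (f' + 1) r c s vis path =
      if Gd g vis r c then 0
      else if s + pvCell g r c = t then 0
      else costT g t f' r c (s + pvCell g r c) pvDirs
        (pvSet2 vis r.toNat c.toNat true) (path ++ [(r, c)]) := rfl

theorem costT_nil (g : List (List Int)) (t : Int) (f : Nat) (r c s : Int)
    (vis : List (List Bool)) (path : List (Int × Int)) :
    costT g t f r c s [] vis path = 1 := by
  cases f <;> simp [costT]

theorem costT_cons (g : List (List Int)) (t : Int) (f : Nat) (r c s dr dc : Int)
    (ds : List (Int × Int)) (vis : List (List Bool)) (path : List (Int × Int)) :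
    costT g t f r c s ((dr, dc) :: ds) vis path =
      (match dfsA g t f (r + dr) (c + dc) s (vis, path) with
       | (_, true) => 1 + costD g t f (r + dr) (c + dc) s vis path
       | (st1, false) => 1 + costD g t f (r + dr) (c + dc) s vis path +
           costT g t f r c s ds st1.1 st1.2) := by
  cases f <;> (rw [costT]; rfl)

theorem costT_cons_true (g : List (List Int)) (t : Int) (f : Nat) (r c s dr dc : Int)
    (ds : List (Int × Int)) (vis : List (List Bool)) (path : List (Int × Int))
    (st1 : List (List Bool) × List (Int × Int))
    (h : dfsA g t f (r + dr) (c + dc) s (vis, path) = (st1, true)) :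
    costT g t f r c s ((dr, dc) :: ds) vis path =
      1 + costD g t f (r + dr) (c + dc) s vis path := by
  rw [costT_cons, h]

theorem costT_cons_false (g : List (List Int)) (t : Int) (f : Nat) (r c s dr dc : Int)
    (ds : List (Int × Int)) (vis : List (List Bool)) (path : List (Int × Int))
    (st1 : List (List Bool) × List (Int × Int))
    (h : dfsA g t f (r + dr) (c + dc) s (vis, path) = (st1, false)) :
    costT g t f r c s ((dr, dc) :: ds) vis path =
      1 + costD g t f (r + dr) (c + dc) s vis path + costT g t f r c s ds st1.1 st1.2 := by
  rw [costT_cons, h]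

theorem tryA_cons_true (g : List (List Int)) (t : Int) (f : Nat) (r c s dr dc : Int)
    (ds : List (Int × Int)) (st st1 : List (List Bool) × List (Int × Int))
    (h : dfsA g t f (r + dr) (c + dc) s st = (st1, true)) :
    tryA g t f r c s ((dr, dc) :: ds) st = (st1, true) := by
  rw [tryA_cons, h]

theorem tryA_cons_false (g : List (List Int)) (t : Int) (f : Nat) (r c s dr dc : Int)
    (ds : List (Int × Int)) (st st1 : List (List Bool) × List (Int × Int))
    (h : dfsA g t f (r + dr) (c + dc) s st = (st1, false)) :
    tryA g t f r c s ((dr, dc) :: ds) st = tryA g t f r c s ds st1 := by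
  rw [tryA_cons, h]

theorem costT_pos (g : List (List Int)) (t : Int) (f : Nat) (r c s : Int)
    (ds : List (Int × Int)) (vis : List (List Bool)) (path : List (Int × Int)) :
    1 ≤ costT g t f r c s ds vis path := by
  cases ds with
  | nil => rw [costT_nil]
  | cons d ds =>
    rcases d with ⟨dr, dc⟩
    rcases hd : dfsA g t f (r + dr) (c + dc) s (vis, path) with ⟨st1, b⟩
    cases b
    · rw [costT_cons_false g t f r c s dr dc ds vis path st1 hd]; omega
    · rw [costT_cons_true g t f r c s dr dc ds vis path st1 hd]; omega

theorem pv_cost_bound (g : List (List Int)) (t : Int) : ∀ f : Nat,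
    (∀ r c s vis path, costD g t f r c s vis path ≤ 10 ^ f) ∧
    (∀ (ds : List (Int × Int)) r c s vis path,
      costT g t f r c s ds vis path ≤ (2 * ds.length + 1) * 10 ^ f) := by
  intro f
  induction f with
  | zero =>
    constructor
    · intro r c s vis path; simp [costD]
    · intro ds
      induction ds with
      | nil => intro r c s vis path; rw [costT_nil]; simp
      | cons d ds ih =>
        intro r c s vis path
        rcases d with ⟨dr, dc⟩
        rcases hd : dfsA g t 0 (r + dr) (c + dc) s (vis, path) with ⟨st1, b⟩
        cases b
        · rw [costT_cons_false g t 0 r c s dr dc ds vis path st1 hd]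
          have h := ih r c s st1.1 st1.2
          simp only [costD, List.length_cons, pow_zero, mul_one] at h ⊢
          omega
        · rw [costT_cons_true g t 0 r c s dr dc ds vis path st1 hd]
          simp only [costD, List.length_cons, pow_zero, mul_one]
          omega
  | succ f ihf =>
    have hD : ∀ r c s vis path, costD g t (f + 1) r c s vis path ≤ 10 ^ (f + 1) := by
      intro r c s vis path
      unfold costD
      split_ifs with h1 h2
      · positivity
      · positivity
      · have h := ihf.2 pvDirs r c (s + pvCell g r c)
          (pvSet2 vis r.toNat c.toNat true) (path ++ [(r, c)])
        simp only [pvDirs, List.length_cons, List.length_nil] at h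
        have hp : (10:Nat) ^ (f + 1) = 10 * 10 ^ f := pow_succ' 10 f
        simp only [pvDirs]
        omega
    refine ⟨hD, ?_⟩
    intro ds
    induction ds with
    | nil =>
      intro r c s vis path; rw [costT_nil]
      have : 1 ≤ 10 ^ (f + 1) := Nat.one_le_pow _ _ (by omega)
      simpa using this
    | cons d ds ih =>
      intro r c s vis path
      rcases d with ⟨dr, dc⟩
      have h1 : 1 ≤ 10 ^ (f + 1) := Nat.one_le_pow _ _ (by omega)
      have hcd := hD (r + dr) (c + dc) s vis path
      rcases hd : dfsA g t (f + 1) (r + dr) (c + dc) s (vis, path) with ⟨st1, b⟩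
      cases b
      · rw [costT_cons_false g t (f + 1) r c s dr dc ds vis path st1 hd]
        have hds := ih r c s st1.1 st1.2
        simp only [List.length_cons] at hds ⊢
        nlinarith
      · rw [costT_cons_true g t (f + 1) r c s dr dc ds vis path st1 hd]
        simp only [List.length_cons]
        nlinarith

-- ---- clean equations for B's loop ----
theorem loopB_none (g : List (List Int)) (t : Int) (f : Nat) (vis : List (List Bool))
    (path : List (Int × Int)) : loopB g t f [] vis path = (vis, path, none) := by
  cases f <;> rfl

theorem loopB_pop (g : List (List Int)) (t : Int) (f : Nat) (r c s : Int)
    (rest : List (Int × Int × Int × List (Int × Int))) (vis : List (List Bool))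
    (path : List (Int × Int)) :
    loopB g t (f + 1) ((r, c, s, []) :: rest) vis path =
      loopB g t f rest (pvSet2 vis r.toNat c.toNat false) path.dropLast := rfl

theorem loopB_dir (g : List (List Int)) (t : Int) (f : Nat) (r c s dr dc : Int)
    (ds' : List (Int × Int)) (rest : List (Int × Int × Int × List (Int × Int)))
    (vis : List (List Bool)) (path : List (Int × Int)) :
    loopB g t (f + 1) ((r, c, s, (dr, dc) :: ds') :: rest) vis path =
      if 0 ≤ r + dr ∧ r + dr < pvRows g ∧ 0 ≤ c + dc ∧ c + dc < pvCols g ∧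
          pvGet2 vis (r + dr).toNat (c + dc).toNat = false then
        if s + pvCell g (r + dr) (c + dc) = t then
          (pvSet2 vis (r + dr).toNat (c + dc).toNat true, path ++ [(r + dr, c + dc)],
            some (path ++ [(r + dr, c + dc)]))
        else
          loopB g t f ((r + dr, c + dc, s + pvCell g (r + dr) (c + dc), pvDirs) ::
            (r, c, s, ds') :: rest)
            (pvSet2 vis (r + dr).toNat (c + dc).toNat true) (path ++ [(r + dr, c + dc)])
      else loopB g t f ((r, c, s, ds') :: rest) vis path := rfl

-- ---- the simulation: B's loop working off one frame computes A's direction fold ----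
theorem pv_main (g : List (List Int)) (t : Int) : ∀ fB : Nat, ∀ (fA : Nat) (r c s : Int)
    (ds : List (Int × Int)) (rest : List (Int × Int × Int × List (Int × Int)))
    (vis : List (List Bool)) (path : List (Int × Int)),
    DimOk g vis → cntF vis < fA → costT g t fA r c s ds vis path ≤ fB →
    (∀ st1, tryA g t fA r c s ds (vis, path) = (st1, true) →
        loopB g t fB ((r, c, s, ds) :: rest) vis path = (st1.1, st1.2, some st1.2)) ∧
    (∀ st1, tryA g t fA r c s ds (vis, path) = (st1, false) →
        loopB g t fB ((r, c, s, ds) :: rest) vis path =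
          loopB g t (fB - costT g t fA r c s ds vis path) rest
            (pvSet2 st1.1 r.toNat c.toNat false) st1.2.dropLast) := by
  intro fB
  induction fB using Nat.strong_induction_on with
  | _ fB ih =>
  intro fA r c s ds rest vis path hdim hcnt hcost
  cases ds with
  | nil =>
    rw [costT_nil] at hcost ⊢
    rcases fB with _ | fB'
    · omega
    constructor
    · intro st1 htr
      rw [tryA_nil] at htr
      injection htr with _ hb; cases hb
    · intro st1 htr
      rw [tryA_nil] at htr
      injection htr with h1 _
      rw [loopB_pop, ← h1]
      norm_num
  | cons d ds' =>
    rcases d with ⟨dr, dc⟩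
    have hpos := costT_pos g t fA r c s ((dr, dc) :: ds') vis path
    rcases fB with _ | fB'
    · omega
    rcases fA with _ | fA''
    · omega
    by_cases hg : Gd g vis (r + dr) (c + dc)
    · -- neighbour rejected by A's guard; B's bounds-and-unvisited test fails too
      have hdval : dfsA g t (fA'' + 1) (r + dr) (c + dc) s (vis, path) = ((vis, path), false) := by
        rw [dfsA_succ, if_pos hg]
      have hcostc := costT_cons_false g t (fA'' + 1) r c s dr dc ds' vis path (vis, path) hdval
      dsimp only at hcostc
      have hcd0 : costD g t (fA'' + 1) (r + dr) (c + dc) s vis path = 0 := by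
        rw [costD_succ, if_pos hg]
      rw [hcostc, hcd0] at hcost
      have hrec := ih fB' (by omega) (fA'' + 1) r c s ds' rest vis path hdim hcnt (by omega)
      have hBnot : ¬ (0 ≤ r + dr ∧ r + dr < pvRows g ∧ 0 ≤ c + dc ∧ c + dc < pvCols g ∧
          pvGet2 vis (r + dr).toNat (c + dc).toNat = false) := by
        rw [pv_guard_iff]; exact not_not.mpr hg
      constructor
      · intro st1 htr
        rw [tryA_cons_false g t (fA'' + 1) r c s dr dc ds' (vis, path) (vis, path) hdval] at htr
        rw [loopB_dir, if_neg hBnot]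
        exact hrec.1 st1 htr
      · intro st1 htr
        rw [tryA_cons_false g t (fA'' + 1) r c s dr dc ds' (vis, path) (vis, path) hdval] at htr
        rw [loopB_dir, if_neg hBnot, hrec.2 st1 htr, hcostc, hcd0]
        congr 1
        omega
    · -- neighbour accepted
      have hB : 0 ≤ r + dr ∧ r + dr < pvRows g ∧ 0 ≤ c + dc ∧ c + dc < pvCols g ∧
          pvGet2 vis (r + dr).toNat (c + dc).toNat = false := (pv_guard_iff g vis _ _).mpr hg
      have hrb : (r + dr).toNat < vis.length := by
        have h1 := hB.1; have h2 := hB.2.1; have h3 := hdim.1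
        simp only [pvRows] at h1 h2; omega
      have hcb : (c + dc).toNat < (vis.getD (r + dr).toNat []).length := by
        have h := pv_dim_row g vis hdim _ hrb
        have h1 := hB.2.2.1; have h2 := hB.2.2.2.1
        simp only [pvCols] at h1 h2; omega
      have hget := hB.2.2.2.2
      have hcntEq := pv_cnt_set vis (r + dr).toNat (c + dc).toNat hrb hcb hget
      have hdim' := pv_dim_set g vis (r + dr).toNat (c + dc).toNat true hdim
      by_cases ht : s + pvCell g (r + dr) (c + dc) = t
      · -- target reached on entering the neighbour
        have hdval : dfsA g t (fA'' + 1) (r + dr) (c + dc) s (vis, path) =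
            ((pvSet2 vis (r + dr).toNat (c + dc).toNat true, path ++ [(r + dr, c + dc)]),
              true) := by
          rw [dfsA_succ, if_neg hg]
          simp only [ht, if_pos]
        constructor
        · intro st1 htr
          rw [tryA_cons_true g t (fA'' + 1) r c s dr dc ds' (vis, path) _ hdval] at htr
          injection htr with h1 _
          rw [loopB_dir, if_pos hB, if_pos ht, ← h1]
        · intro st1 htr
          rw [tryA_cons_true g t (fA'' + 1) r c s dr dc ds' (vis, path) _ hdval] at htr
          injection htr with _ hb; cases hb
      · -- recurse into the neighbour
        rcases htryC : tryA g t fA'' (r + dr) (c + dc) (s + pvCell g (r + dr) (c + dc)) pvDirs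
            (pvSet2 vis (r + dr).toNat (c + dc).toNat true, path ++ [(r + dr, c + dc)])
          with ⟨stC, bC⟩
        have hCC : costD g t (fA'' + 1) (r + dr) (c + dc) s vis path =
            costT g t fA'' (r + dr) (c + dc) (s + pvCell g (r + dr) (c + dc)) pvDirs
              (pvSet2 vis (r + dr).toNat (c + dc).toNat true) (path ++ [(r + dr, c + dc)]) := by
          rw [costD_succ, if_neg hg, if_neg ht]
        have hcnt' : cntF (pvSet2 vis (r + dr).toNat (c + dc).toNat true) < fA'' := by omega
        cases bC with
        | true =>
          have hdval : dfsA g t (fA'' + 1) (r + dr) (c + dc) s (vis, path) = (stC, true) := by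
            rw [dfsA_succ, if_neg hg]
            simp [htryC, ht]
          have hcostc := costT_cons_true g t (fA'' + 1) r c s dr dc ds' vis path stC hdval
          have hCCle : costT g t fA'' (r + dr) (c + dc) (s + pvCell g (r + dr) (c + dc)) pvDirs
              (pvSet2 vis (r + dr).toNat (c + dc).toNat true) (path ++ [(r + dr, c + dc)])
                ≤ fB' := by
            rw [hcostc, hCC] at hcost; omega
          have hchild := (ih fB' (by omega) fA'' (r + dr) (c + dc)
            (s + pvCell g (r + dr) (c + dc)) pvDirs ((r, c, s, ds') :: rest)
            (pvSet2 vis (r + dr).toNat (c + dc).toNat true) (path ++ [(r + dr, c + dc)])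
            hdim' hcnt' hCCle).1 stC htryC
          constructor
          · intro st1 htr
            rw [tryA_cons_true g t (fA'' + 1) r c s dr dc ds' (vis, path) stC hdval] at htr
            injection htr with h1 _
            rw [loopB_dir, if_pos hB, if_neg ht, hchild, ← h1]
          · intro st1 htr
            rw [tryA_cons_true g t (fA'' + 1) r c s dr dc ds' (vis, path) stC hdval] at htr
            injection htr with _ hb; cases hb
        | false =>
          have hstC : stC = (pvSet2 vis (r + dr).toNat (c + dc).toNat true,
              path ++ [(r + dr, c + dc)]) :=
            (pv_restore g t fA'').2 pvDirs (r + dr) (c + dc) _ _ _ stC htryC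
          have hdval : dfsA g t (fA'' + 1) (r + dr) (c + dc) s (vis, path) =
              ((vis, path), false) := by
            rw [dfsA_succ, if_neg hg]
            simp [htryC, ht, hstC, pv_set_unset vis (r + dr).toNat (c + dc).toNat hget,
              List.dropLast_concat]
          have hcostc := costT_cons_false g t (fA'' + 1) r c s dr dc ds' vis path (vis, path) hdval
          dsimp only at hcostc
          have hCCle : costT g t fA'' (r + dr) (c + dc) (s + pvCell g (r + dr) (c + dc)) pvDirs
              (pvSet2 vis (r + dr).toNat (c + dc).toNat true) (path ++ [(r + dr, c + dc)])
                ≤ fB' := by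
            rw [hcostc, hCC] at hcost
            have := costT_pos g t (fA'' + 1) r c s ds' vis path
            omega
          have hchild := (ih fB' (by omega) fA'' (r + dr) (c + dc)
            (s + pvCell g (r + dr) (c + dc)) pvDirs ((r, c, s, ds') :: rest)
            (pvSet2 vis (r + dr).toNat (c + dc).toNat true) (path ++ [(r + dr, c + dc)])
            hdim' hcnt' hCCle).2 stC htryC
          rw [hstC] at hchild
          dsimp only at hchild
          simp only [pv_set_unset vis (r + dr).toNat (c + dc).toNat hget,
            List.dropLast_concat] at hchild
          have hrestle : costT g t (fA'' + 1) r c s ds' vis path ≤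
              fB' - costT g t fA'' (r + dr) (c + dc) (s + pvCell g (r + dr) (c + dc)) pvDirs
                (pvSet2 vis (r + dr).toNat (c + dc).toNat true) (path ++ [(r + dr, c + dc)]) := by
            rw [hcostc, hCC] at hcost; omega
          have hrest := ih (fB' - costT g t fA'' (r + dr) (c + dc)
              (s + pvCell g (r + dr) (c + dc)) pvDirs
              (pvSet2 vis (r + dr).toNat (c + dc).toNat true) (path ++ [(r + dr, c + dc)]))
            (by omega) (fA'' + 1) r c s ds' rest vis path hdim hcnt hrestle
          constructor
          · intro st1 htr
            rw [tryA_cons_false g t (fA'' + 1) r c s dr dc ds' (vis, path) (vis, path) hdval] at htr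
            rw [loopB_dir, if_pos hB, if_neg ht, hchild]
            exact hrest.1 st1 htr
          · intro st1 htr
            rw [tryA_cons_false g t (fA'' + 1) r c s dr dc ds' (vis, path) (vis, path) hdval] at htr
            rw [loopB_dir, if_pos hB, if_neg ht, hchild, hrest.2 st1 htr, hcostc, hCC]
            congr 1
            omega


-- ---- facts about the initial all-false visited matrix ----
theorem pv_getD_replicate {α : Type} (d a : α) : ∀ (n i : Nat),
    (List.replicate n a).getD i d = if i < n then a else d := by
  intro n
  induction n with
  | zero => intro i; simp
  | succ m ih =>
    intro i
    cases i with
    | zero => simp [List.replicate_succ]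
    | succ k => simpa [List.replicate_succ, Nat.succ_lt_succ_iff] using ih k

theorem pv_getV0 (R C : Nat) (i j : Nat) :
    pvGet2 (List.replicate R (List.replicate C false)) i j = false := by
  unfold pvGet2
  rw [pv_getD_replicate]
  split
  · rw [pv_getD_replicate]; split <;> rfl
  · simp

theorem pv_dimV0 (g : List (List Int)) :
    DimOk g (List.replicate g.length (List.replicate (g.headD []).length false)) := by
  constructor
  · simp
  · intro row hr
    rw [List.eq_of_mem_replicate hr]
    simp

theorem pv_cntV0 (R C : Nat) :
    cntF (List.replicate R (List.replicate C false)) = R * C := by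
  have hrow : (List.replicate C false).count false = C := by
    induction C with
    | zero => simp
    | succ m ih => simp [List.replicate_succ, List.count_cons, ih]
  unfold cntF
  rw [List.map_replicate, hrow]
  induction R with
  | zero => simp
  | succ m ih => simp [List.replicate_succ, ih]; ring

-- ---- clean equations for the two start loops ----
theorem startsA_nil (g : List (List Int)) (t : Int) (vis : List (List Bool))
    (path : List (Int × Int)) : startsA g t [] vis path = (false, []) := rfl

theorem startsA_cons (g : List (List Int)) (t : Int) (i j : Int) (rest : List (Int × Int))
    (vis : List (List Bool)) (path : List (Int × Int)) :
    startsA g t ((i, j) :: rest) vis path =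
      (match dfsA g t (g.length * (g.headD []).length + 1) i j 0 (vis, path) with
       | (st, true) => (true, st.2)
       | (st, false) => startsA g t rest st.1 st.2) := rfl

theorem startsA_cons_true (g : List (List Int)) (t : Int) (i j : Int) (rest : List (Int × Int))
    (vis : List (List Bool)) (path : List (Int × Int)) (st : List (List Bool) × List (Int × Int))
    (h : dfsA g t (g.length * (g.headD []).length + 1) i j 0 (vis, path) = (st, true)) :
    startsA g t ((i, j) :: rest) vis path = (true, st.2) := by
  rw [startsA_cons, h]

theorem startsA_cons_false (g : List (List Int)) (t : Int) (i j : Int) (rest : List (Int × Int))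
    (vis : List (List Bool)) (path : List (Int × Int)) (st : List (List Bool) × List (Int × Int))
    (h : dfsA g t (g.length * (g.headD []).length + 1) i j 0 (vis, path) = (st, false)) :
    startsA g t ((i, j) :: rest) vis path = startsA g t rest st.1 st.2 := by
  rw [startsA_cons, h]

theorem startsB_nil (g : List (List Int)) (t : Int) (vis : List (List Bool))
    (path : List (Int × Int)) : startsB g t [] vis path = (false, []) := rfl

theorem startsB_cons (g : List (List Int)) (t : Int) (i j : Int) (rest : List (Int × Int))
    (vis : List (List Bool)) (path : List (Int × Int)) :
    startsB g t ((i, j) :: rest) vis path =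
      (if pvCell g i j = t then (true, path ++ [(i, j)])
       else
        match loopB g t (10 ^ (g.length * (g.headD []).length + 1))
            [(i, j, pvCell g i j, pvDirs)] (pvSet2 vis i.toNat j.toNat true)
            (path ++ [(i, j)]) with
        | (_, _, some p) => (true, p)
        | (vis1, path1, none) => startsB g t rest vis1 path1) := rfl

theorem startsB_cons_hit (g : List (List Int)) (t : Int) (i j : Int) (rest : List (Int × Int))
    (vis : List (List Bool)) (path : List (Int × Int)) (h : pvCell g i j = t) :
    startsB g t ((i, j) :: rest) vis path = (true, path ++ [(i, j)]) := by
  rw [startsB_cons, if_pos h]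

theorem startsB_cons_found (g : List (List Int)) (t : Int) (i j : Int) (rest : List (Int × Int))
    (vis v1 : List (List Bool)) (path p1 p : List (Int × Int)) (hne : ¬ pvCell g i j = t)
    (h : loopB g t (10 ^ (g.length * (g.headD []).length + 1))
        [(i, j, pvCell g i j, pvDirs)] (pvSet2 vis i.toNat j.toNat true) (path ++ [(i, j)])
      = (v1, p1, some p)) :
    startsB g t ((i, j) :: rest) vis path = (true, p) := by
  rw [startsB_cons, if_neg hne, h]

theorem startsB_cons_none (g : List (List Int)) (t : Int) (i j : Int) (rest : List (Int × Int))
    (vis v1 : List (List Bool)) (path p1 : List (Int × Int)) (hne : ¬ pvCell g i j = t)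
    (h : loopB g t (10 ^ (g.length * (g.headD []).length + 1))
        [(i, j, pvCell g i j, pvDirs)] (pvSet2 vis i.toNat j.toNat true) (path ++ [(i, j)])
      = (v1, p1, none)) :
    startsB g t ((i, j) :: rest) vis path = startsB g t rest v1 p1 := by
  rw [startsB_cons, if_neg hne, h]

-- ---- the start loops agree, one start cell at a time ----
theorem pv_starts (g : List (List Int)) (t : Int) : ∀ pairs : List (Int × Int),
    (∀ p ∈ pairs, 0 ≤ p.1 ∧ p.1 < pvRows g ∧ 0 ≤ p.2 ∧ p.2 < pvCols g) →
    startsA g t pairs (List.replicate g.length (List.replicate (g.headD []).length false)) [] =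
    startsB g t pairs (List.replicate g.length (List.replicate (g.headD []).length false)) [] := by
  intro pairs
  induction pairs with
  | nil => intro _; rw [startsA_nil, startsB_nil]
  | cons p rest ihp =>
    intro hmem
    rcases p with ⟨i, j⟩
    have hb := hmem (i, j) (List.mem_cons_self ..)
    obtain ⟨hi0, hiR, hj0, hjC⟩ := hb
    have hgs : ¬ Gd g (List.replicate g.length (List.replicate (g.headD []).length false)) i j := by
      rw [← pv_guard_iff]
      exact ⟨hi0, hiR, hj0, hjC, pv_getV0 _ _ _ _⟩
    have hNR : i.toNat < g.length := by simp only [pvRows] at hiR; omega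
    have hNC : j.toNat < (g.headD []).length := by simp only [pvCols] at hjC; omega
    have hN1 : 1 ≤ g.length * (g.headD []).length := Nat.mul_pos (by omega) (by omega)
    by_cases hts : pvCell g i j = t
    · -- the start cell itself matches the target
      have hdval : dfsA g t (g.length * (g.headD []).length + 1) i j 0
          (List.replicate g.length (List.replicate (g.headD []).length false), []) =
          ((pvSet2 (List.replicate g.length (List.replicate (g.headD []).length false))
              i.toNat j.toNat true, ([] : List (Int × Int)) ++ [(i, j)]), true) := by
        rw [dfsA_succ, if_neg hgs]
        simp [hts]
      rw [startsA_cons_true g t i j rest _ _ _ hdval, startsB_cons_hit g t i j rest _ _ hts]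
    · -- run the search from this start cell
      have hts' : ¬ (0 + pvCell g i j = t) := by simpa using hts
      have hdim0 := pv_dim_set g _ i.toNat j.toNat true (pv_dimV0 g)
      have hcnt0 : cntF (pvSet2 (List.replicate g.length
          (List.replicate (g.headD []).length false)) i.toNat j.toNat true)
            < g.length * (g.headD []).length := by
        have hcb : j.toNat < ((List.replicate g.length
            (List.replicate (g.headD []).length false)).getD i.toNat []).length := by
          rw [pv_getD_replicate, if_pos (by simpa using hNR)]
          simpa using hNC
        have := pv_cnt_set _ i.toNat j.toNat (by simpa using hNR) hcb (pv_getV0 _ _ _ _)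
        rw [pv_cntV0] at this
        omega
      have hcostle : costT g t (g.length * (g.headD []).length) i j (0 + pvCell g i j) pvDirs
          (pvSet2 (List.replicate g.length (List.replicate (g.headD []).length false))
            i.toNat j.toNat true) (([] : List (Int × Int)) ++ [(i, j)])
          ≤ 10 ^ (g.length * (g.headD []).length + 1) := by
        have h := (pv_cost_bound g t (g.length * (g.headD []).length)).2 pvDirs i j
          (0 + pvCell g i j)
          (pvSet2 (List.replicate g.length (List.replicate (g.headD []).length false))
            i.toNat j.toNat true) (([] : List (Int × Int)) ++ [(i, j)])
        have hlen : 2 * pvDirs.length + 1 = 9 := by simp [pvDirs]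
        rw [hlen] at h
        have hp : (10:Nat) ^ (g.length * (g.headD []).length + 1) =
            10 * 10 ^ (g.length * (g.headD []).length) := pow_succ' 10 _
        omega
      have hmain := pv_main g t (10 ^ (g.length * (g.headD []).length + 1))
        (g.length * (g.headD []).length) i j (0 + pvCell g i j) pvDirs []
        (pvSet2 (List.replicate g.length (List.replicate (g.headD []).length false))
          i.toNat j.toNat true) (([] : List (Int × Int)) ++ [(i, j)])
        hdim0 hcnt0 hcostle
      rcases htry : tryA g t (g.length * (g.headD []).length) i j (0 + pvCell g i j) pvDirs
          (pvSet2 (List.replicate g.length (List.replicate (g.headD []).length false))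
            i.toNat j.toNat true, ([] : List (Int × Int)) ++ [(i, j)]) with ⟨st1, b⟩
      have htryn := htry
      simp at htryn
      cases b with
      | true =>
        have hdval : dfsA g t (g.length * (g.headD []).length + 1) i j 0
            (List.replicate g.length (List.replicate (g.headD []).length false), []) =
            (st1, true) := by
          rw [dfsA_succ, if_neg hgs]
          simp [hts, htryn]
        have hloop := hmain.1 st1 htry
        have hloop' : loopB g t (10 ^ (g.length * (g.headD []).length + 1))
            [(i, j, pvCell g i j, pvDirs)]
            (pvSet2 (List.replicate g.length (List.replicate (g.headD []).length false))
              i.toNat j.toNat true) (([] : List (Int × Int)) ++ [(i, j)])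
            = (st1.1, st1.2, some st1.2) := by
          rw [← hloop]
          norm_num
        rw [startsA_cons_true g t i j rest _ _ _ hdval,
          startsB_cons_found g t i j rest _ st1.1 [] st1.2 st1.2 hts hloop']
      | false =>
        have hst1 : st1 = (pvSet2 (List.replicate g.length
            (List.replicate (g.headD []).length false)) i.toNat j.toNat true,
            ([] : List (Int × Int)) ++ [(i, j)]) :=
          (pv_restore g t _).2 pvDirs i j _ _ _ st1 htry
        have hunset := pv_set_unset (List.replicate g.length
            (List.replicate (g.headD []).length false)) i.toNat j.toNat (pv_getV0 _ _ _ _)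
        have hst1n := hst1
        simp at hst1n
        have hunsetn := hunset
        simp at hunsetn
        have hdval : dfsA g t (g.length * (g.headD []).length + 1) i j 0
            (List.replicate g.length (List.replicate (g.headD []).length false), []) =
            ((List.replicate g.length (List.replicate (g.headD []).length false),
              ([] : List (Int × Int))), false) := by
          rw [dfsA_succ, if_neg hgs]
          simp [hts, htryn, hst1n, hunsetn]
        have hloop := hmain.2 st1 htry
        rw [hst1] at hloop
        dsimp only at hloop
        rw [hunset, List.dropLast_concat, loopB_none] at hloop
        have hloop' : loopB g t (10 ^ (g.length * (g.headD []).length + 1))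
            [(i, j, pvCell g i j, pvDirs)]
            (pvSet2 (List.replicate g.length (List.replicate (g.headD []).length false))
              i.toNat j.toNat true) (([] : List (Int × Int)) ++ [(i, j)])
            = (List.replicate g.length (List.replicate (g.headD []).length false),
                ([] : List (Int × Int)), none) := by
          rw [← hloop]
          norm_num
        rw [startsA_cons_false g t i j rest _ _ _ hdval,
          startsB_cons_none g t i j rest _ _ [] _ hts hloop']
        exact ihp (fun p hp => hmem p (List.mem_cons_of_mem _ hp))

theorem pv_starts_mem (g : List (List Int)) : ∀ p ∈ pvStarts g,
    0 ≤ p.1 ∧ p.1 < pvRows g ∧ 0 ≤ p.2 ∧ p.2 < pvCols g := by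
  intro p hp
  unfold pvStarts at hp
  obtain ⟨a, ha, hp2⟩ := List.mem_flatMap.mp hp
  obtain ⟨b, hb, hpe⟩ := List.mem_map.mp hp2
  cases hpe
  have ha' := List.mem_range.mp ha
  have hb' := List.mem_range.mp hb
  exact ⟨Int.natCast_nonneg a, by simp only [pvRows]; exact_mod_cast ha',
    Int.natCast_nonneg b, by simp only [pvCols]; exact_mod_cast hb'⟩

theorem pv_main_equiv (grid : List (List Int)) (target : Int) :
    find_path_with_target_sum grid target = find_path_with_target_sum_alt grid target := by
  unfold find_path_with_target_sum find_path_with_target_sum_alt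
  exact pv_starts grid target (pvStarts grid) (pv_starts_mem grid)

-- ===== VERDICT (by name: the statement is the Claim_ definition above) =====
theorem find_path_with_target_sum_spec : Claim_equal_find_path_with_target_sum := by
  intro grid target _ _
  unfold Spec_find_path_with_target_sum
  exact pv_main_equiv grid target
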